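-- pv_equiv track=rewrite | github.com/tchlux/tlux | tlux/regex/regex.py | translate_regex
-- ===== SOURCE A (Python) =====
-- def translate_regex(regex, case_sensitive=True):
--     # Do substitutions that make the underlying regex implementation
--     # behave more like common existing regex packages.
--     if (len(regex) > 0):
--         # Add a ".*" to the front of the regex if the beginning of the
--         # string was not explicitly desired in the match pattern.
--         if (regex[0] == "^"): regex = regex[1:]
--         elif ((len(regex) < 2) or (regex[0] != ".") or (regex[1] != '*')):
--             regex = ".*" + regex
--         # Add a "{.}" to the end of the regex if the end of the string
--         # was explicitly requested in the pattern.
--         if (regex[-1] == "$"): regex = regex[:-1] + "{.}"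
--     # Replace all alphebetical characters with token sets that include
--     # all cases of that character.
--     if (not case_sensitive):
--         i = 0
--         in_literal = False
--         while (i < len(regex)):
--             # Check for the beginning of a token set.
--             if ((regex[i] == '[') and (not in_literal)):
--                 in_literal = True
--                 contains = set()
--                 missing = set()
--             # Handle a currently-active token set.
--             elif (in_literal):
--                 # Check for the end of this token set.
--                 if (regex[i] == ']'):
--                     in_literal = False
--                     # Add all the missing characters to this token set.
--                     missing = ''.join(sorted(missing.difference(contains)))
--                     regex = regex[:i] + missing + regex[i:]
--                     # Increment i appropriately.
--                     i += len(missing)-1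
--                 # Add the paired-case if we see a cased character.
--                 elif (regex[i].isalpha()):
--                     contains.add(regex[i])
--                     if (regex[i].islower()):
--                         missing.add(regex[i].upper())
--                     else:
--                         missing.add(regex[i].lower())
--             # Otherwise replace this single character with a token set.
--             elif (regex[i].isalpha()):
--                 if (regex[i].islower()):
--                     token_set = f'[{regex[i]}{regex[i].upper()}]'
--                 else:
--                     token_set = f'[{regex[i]}{regex[i].lower()}]'
--                 regex = regex[:i] + token_set + regex[i+1:]
--                 i += len(token_set)-1
--             # Increment to the next token.
--             i += 1
--     # Return the now-prepared regular expression.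
--     return regex
-- ===== SOURCE B (Python) =====
-- def translate_regex(regex, case_sensitive=True):
--     # Anchor phase (same guard block as the original).
--     if len(regex) > 0:
--         if regex[0] == "^":
--             regex = regex[1:]
--         elif (len(regex) < 2) or (regex[0] != ".") or (regex[1] != "*"):
--             regex = ".*" + regex
--         if regex[-1] == "$":
--             regex = regex[:-1] + "{.}"
--     if case_sensitive:
--         return regex
--     # Case-insensitive phase: tokenize the regex into segments (a complete
--     # "[...]" set, an unterminated "[..." running to the end, or one char)
--     # and transform each segment independently; never splice in place.
--     out = []
--     i = 0
--     n = len(regex)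
--     while i < n:
--         ch = regex[i]
--         if ch == '[':
--             end = regex.find(']', i + 1)
--             if end == -1:
--                 out.append(regex[i:])  # unterminated set: passes through untouched
--                 break
--             out.append(_expand_set(regex[i:end + 1]))
--             i = end + 1
--         elif ch.isalpha():
--             out.append('[' + ch + (ch.upper() if ch.islower() else ch.lower()) + ']')
--             i += 1
--         else:
--             out.append(ch)
--             i += 1
--     return ''.join(out)
--
--
-- def _expand_set(group):
--     # group == '[' + content + ']' where content has no ']'.
--     contains = set()
--     missing = set()
--     for ch in group[1:-1]:
--         if ch.isalpha():
--             contains.add(ch)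
--             missing.add(ch.upper() if ch.islower() else ch.lower())
--     return group[:-1] + ''.join(sorted(missing - contains)) + ']'
-- ===== Notes on version B (the rewrite author's own statement) =====
-- stated objective: alternative
-- what changed: The case-insensitive phase is rewritten from A's single in-place loop that splices characters into the string it is iterating over (with index arithmetic to skip its own insertions and an in_literal mode flag) into a tokenize-then-map pass: the regex is cut into segments (a complete [...] set, an unterminated [... tail, or one character), each segment is transformed independently, and the pieces are joined.
import Mathlib
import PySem

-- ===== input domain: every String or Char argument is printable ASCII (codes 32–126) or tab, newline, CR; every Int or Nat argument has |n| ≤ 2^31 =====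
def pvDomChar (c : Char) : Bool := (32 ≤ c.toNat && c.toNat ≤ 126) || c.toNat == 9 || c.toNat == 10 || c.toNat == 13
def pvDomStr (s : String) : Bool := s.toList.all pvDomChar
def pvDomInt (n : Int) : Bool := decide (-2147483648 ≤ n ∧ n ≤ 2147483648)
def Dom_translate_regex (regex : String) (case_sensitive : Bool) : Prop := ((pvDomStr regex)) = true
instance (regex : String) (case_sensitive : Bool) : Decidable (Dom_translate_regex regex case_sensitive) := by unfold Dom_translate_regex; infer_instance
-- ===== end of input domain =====

-- B re-implements the case-insensitive phase as tokenize-then-map (no in-place splicing); same return value, objective: alternative decomposition.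

-- ===== PORT A =====
-- The while loop of A: `s` is the (mutable) regex, `i` the index, `inLit` = in_literal,
-- `contains`/`missing` the two sets.  String splices regex[:i] + x + regex[j:] are
-- take/drop at the Nat index i (0 ≤ i < len holds at each splice).
def pvA_loop (s : List Char) (i : Nat) (inLit : Bool)
    (contains missing : PySem.Set Char) : List Char :=
  if h : i < s.length then
    if s[i]'h = '[' ∧ inLit = false then
      pvA_loop s (i+1) true PySem.Set.empty PySem.Set.empty
    else if inLit = true then
      if s[i]'h = ']' then
        -- missing = ''.join(sorted(missing.difference(contains))); regex = regex[:i] + missing + regex[i:]; i += len(missing)-1; i += 1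
        let miss := PySem.List.sorted (PySem.Set.diff missing contains) (fun x => x) false
        pvA_loop (s.take i ++ miss ++ s.drop i) (i + miss.length) false contains missing
      else if PySem.Chars.isalpha (s[i]'h) then
        pvA_loop s (i+1) true (PySem.Set.add contains (s[i]'h))
          (PySem.Set.add missing (if PySem.Chars.islower (s[i]'h)
            then PySem.Chars.upperChar (s[i]'h) else PySem.Chars.lowerChar (s[i]'h)))
      else
        pvA_loop s (i+1) true contains missing
    else if PySem.Chars.isalpha (s[i]'h) then
      -- token_set = f'[{c}{c.upper/lower()}]'; regex = regex[:i] + token_set + regex[i+1:]; i += 3; i += 1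
      let tok : List Char := if PySem.Chars.islower (s[i]'h)
        then ['[', s[i]'h, PySem.Chars.upperChar (s[i]'h), ']']
        else ['[', s[i]'h, PySem.Chars.lowerChar (s[i]'h), ']']
      pvA_loop (s.take i ++ tok ++ s.drop (i+1)) (i + 4) inLit contains missing
    else
      pvA_loop s (i+1) inLit contains missing
  else s
termination_by 2 * (s.length - i) + (if inLit then 1 else 0)
decreasing_by
  all_goals simp [List.length_append, List.length_take, List.length_drop]
  all_goals (try split_ifs) <;> (try simp) <;> omega

def translate_regex (regex : String) (case_sensitive : Bool) : String :=
  let r0 := regex.toList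
  let r1 := if 0 < r0.length then
      let r := if r0.getD 0 ' ' = '^' then PySem.List.slice r0 (some 1) none
               else if r0.length < 2 ∨ r0.getD 0 ' ' ≠ '.' ∨ r0.getD 1 ' ' ≠ '*' then '.' :: '*' :: r0
               else r0
      -- regex[-1]: IndexError when r = [] (only regex = "^"); excluded by Pre_ below
      if r.getLast? = some '$' then PySem.List.slice r none (some (-1)) ++ ['{', '.', '}'] else r
    else r0
  if case_sensitive = false then
    String.ofList (pvA_loop r1 0 false PySem.Set.empty PySem.Set.empty)
  else String.ofList r1

-- ===== PORT B =====
-- _expand_set(group): group == '[' + content + ']' with no ']' in content.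
def pvB_expand (grp : List Char) : List Char :=
  let content := PySem.List.slice grp (some 1) (some (-1))
  let p := content.foldl (fun (p : PySem.Set Char × PySem.Set Char) ch =>
      if PySem.Chars.isalpha ch then
        (PySem.Set.add p.1 ch, PySem.Set.add p.2 (if PySem.Chars.islower ch
          then PySem.Chars.upperChar ch else PySem.Chars.lowerChar ch))
      else p) (PySem.Set.empty, PySem.Set.empty)
  PySem.List.slice grp none (some (-1)) ++
    PySem.List.sorted (PySem.Set.diff p.2 p.1) (fun x => x) false ++ [']']

-- B's tokenizing loop over the remaining suffix regex[i:]; it appends one transformed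
-- segment per iteration.  regex.find(']', i+1) is the index of ']' in the suffix after
-- the '[' (PySem.List.index?; none = -1).
def pvB_loop : List Char → List (List Char)
  | [] => []
  | c :: tl =>
    if c = '[' then
      match PySem.List.index? tl ']' with
      | none => [c :: tl]                                   -- unterminated set: untouched, then break
      | some j => pvB_expand (c :: (tl.take j ++ [']'])) :: pvB_loop (tl.drop (j+1))
    else if PySem.Chars.isalpha c then
      (if PySem.Chars.islower c then ['[', c, PySem.Chars.upperChar c, ']']
       else ['[', c, PySem.Chars.lowerChar c, ']']) :: pvB_loop tl
    else [c] :: pvB_loop tl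
termination_by l => l.length
decreasing_by
  all_goals simp_all [List.length_drop] <;> omega

def translate_regex_alt (regex : String) (case_sensitive : Bool) : String :=
  let r0 := regex.toList
  let r1 := if 0 < r0.length then
      let r := if r0.getD 0 ' ' = '^' then PySem.List.slice r0 (some 1) none
               else if r0.length < 2 ∨ r0.getD 0 ' ' ≠ '.' ∨ r0.getD 1 ' ' ≠ '*' then '.' :: '*' :: r0
               else r0
      if r.getLast? = some '$' then PySem.List.slice r none (some (-1)) ++ ['{', '.', '}'] else r
    else r0
  if case_sensitive = true then String.ofList r1
  else String.ofList ((pvB_loop r1).flatten)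

-- ===== PRECONDITION & SPEC =====
-- Pre_ excludes exactly regex = "^": there A (and B, which keeps the same guard block)
-- raises IndexError on regex[-1] after stripping the '^' from the now-empty string.
def Pre_translate_regex (regex : String) (case_sensitive : Bool) : Prop := regex ≠ "^"
instance (regex : String) (case_sensitive : Bool) : Decidable (Pre_translate_regex regex case_sensitive) := by unfold Pre_translate_regex; infer_instance

def pvWitness_translate_regex : String × Bool := ("[ab]c^", false)

def Spec_translate_regex (regex : String) (case_sensitive : Bool) (out : String) : Prop := out = translate_regex_alt regex case_sensitive
instance (regex : String) (case_sensitive : Bool) (out : String) : Decidable (Spec_translate_regex regex case_sensitive out) := by unfold Spec_translate_regex; infer_instance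

-- ===== CLAIM (what is proved, stated in full; the proofs are below) =====
def Claim_equal_translate_regex : Prop := ∀ (regex : String) (case_sensitive : Bool), Dom_translate_regex regex case_sensitive → Pre_translate_regex regex case_sensitive → Spec_translate_regex regex case_sensitive (translate_regex regex case_sensitive)

-- ===== LEMMAS AND PROOFS =====

-- The set-accumulation step both programs perform on a character inside a token set.
def pvStep (p : PySem.Set Char × PySem.Set Char) (ch : Char) : PySem.Set Char × PySem.Set Char :=
  if PySem.Chars.isalpha ch then
    (PySem.Set.add p.1 ch, PySem.Set.add p.2 (if PySem.Chars.islower ch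
      then PySem.Chars.upperChar ch else PySem.Chars.lowerChar ch))
  else p

lemma pvB_expand_eq (content : List Char) :
    pvB_expand ('[' :: (content ++ [']'])) =
      '[' :: content ++
        PySem.List.sorted (PySem.Set.diff (content.foldl pvStep (PySem.Set.empty, PySem.Set.empty)).2
          (content.foldl pvStep (PySem.Set.empty, PySem.Set.empty)).1) (fun x => x) false ++ [']'] := by
  unfold pvB_expand
  have h1 : PySem.List.slice ('[' :: (content ++ [']'])) (some 1) (some (-1)) = content := by
    simp [PySem.List.slice, PySem.List.clampIdx]
    rw [if_neg (by omega)]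
    simp [List.take_left']
  have h2 : PySem.List.slice ('[' :: (content ++ [']'])) none (some (-1)) = '[' :: content := by
    rw [show '[' :: (content ++ [']']) = ('[' :: content) ++ [']'] from rfl,
      PySem.List.slice_to_neg_one, List.dropLast_concat]
  rw [h1, h2]
  rfl

-- Literal mode with no closing ']' up to the end: the string is left unchanged.
lemma pvA_litEnd : ∀ (rest : List Char), ']' ∉ rest →
    ∀ (done : List Char) (c m : PySem.Set Char),
      pvA_loop (done ++ rest) done.length true c m = done ++ rest := by
  intro rest
  induction rest with
  | nil => intro _ done c m; rw [pvA_loop]; simp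
  | cons x r ih =>
    intro hcl done c m
    obtain ⟨hx, hr⟩ : ']' ≠ x ∧ ']' ∉ r := by simpa [List.mem_cons, not_or] using hcl
    have hlt : done.length < (done ++ x :: r).length := by simp
    rw [pvA_loop, dif_pos hlt]
    have hget : (done ++ x :: r)[done.length]'hlt = x := by simp
    rw [hget, if_neg (by simp), if_pos rfl, if_neg (Ne.symm hx)]
    have key : ∀ (c' m' : PySem.Set Char),
        pvA_loop (done ++ x :: r) (done.length + 1) true c' m' = done ++ x :: r := by
      intro c' m'
      have := ih hr (done ++ [x]) c' m'
      simpa [List.append_assoc] using this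
    split_ifs <;> exact key _ _

-- One Normal-mode step over a non-'[' non-alpha character.
lemma pvA_skipChar (done : List Char) (x : Char) (r : List Char) (c m : PySem.Set Char)
    (hx1 : x ≠ '[') (hx2 : PySem.Chars.isalpha x = false) :
    pvA_loop (done ++ x :: r) done.length false c m =
      pvA_loop ((done ++ [x]) ++ r) (done ++ [x]).length false c m := by
  have hlt : done.length < (done ++ x :: r).length := by simp
  rw [pvA_loop, dif_pos hlt]
  have hget : (done ++ x :: r)[done.length]'hlt = x := by simp
  rw [hget, if_neg (by simp [hx1]), if_neg (by simp), if_neg (by simp [hx2])]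
  simp [List.append_assoc]

-- Literal mode consuming `content` (no ']') then the closing ']': reduces to the
-- state just after the splice, i.e. Normal mode sitting on the original ']'.
lemma pvA_litStep : ∀ (content : List Char), ']' ∉ content →
    ∀ (r done : List Char) (c m : PySem.Set Char),
      pvA_loop (done ++ (content ++ ']' :: r)) done.length true c m =
        pvA_loop ((done ++ content ++
            PySem.List.sorted (PySem.Set.diff (content.foldl pvStep (c, m)).2
              (content.foldl pvStep (c, m)).1) (fun x => x) false) ++ ']' :: r)
          (done ++ content ++
            PySem.List.sorted (PySem.Set.diff (content.foldl pvStep (c, m)).2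
              (content.foldl pvStep (c, m)).1) (fun x => x) false).length
          false (content.foldl pvStep (c, m)).1 (content.foldl pvStep (c, m)).2 := by
  intro content
  induction content with
  | nil =>
    intro _ r done c m
    have hlt : done.length < (done ++ ([] ++ ']' :: r)).length := by simp
    rw [pvA_loop, dif_pos hlt]
    have hget : (done ++ ([] ++ ']' :: r))[done.length]'hlt = ']' := by simp
    rw [hget, if_neg (by simp), if_pos rfl, if_pos rfl]
    simp [List.append_assoc]
  | cons x cs ih =>
    intro hcl r done c m
    obtain ⟨hx, hcs⟩ : ']' ≠ x ∧ ']' ∉ cs := by simpa [List.mem_cons, not_or] using hcl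
    have hlt : done.length < (done ++ ((x :: cs) ++ ']' :: r)).length := by simp
    rw [pvA_loop, dif_pos hlt]
    have hget : (done ++ ((x :: cs) ++ ']' :: r))[done.length]'hlt = x := by simp
    rw [hget, if_neg (by simp), if_pos rfl, if_neg (Ne.symm hx)]
    by_cases halpha : PySem.Chars.isalpha x = true
    · rw [if_pos halpha]
      have := ih hcs r (done ++ [x]) (PySem.Set.add c x)
        (PySem.Set.add m (if PySem.Chars.islower x
          then PySem.Chars.upperChar x else PySem.Chars.lowerChar x))
      simp only [List.foldl_cons, pvStep, halpha, if_true]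
      simpa [List.append_assoc] using this
    · rw [if_neg halpha]
      have := ih hcs r (done ++ [x]) c m
      simp only [List.foldl_cons, pvStep, halpha, if_false]
      simpa [List.append_assoc] using this

-- Main invariant: in Normal mode A's in-place loop on done ++ rest equals done
-- followed by B's tokenized transformation of rest.
lemma pvA_normInv : ∀ (n : Nat) (rest : List Char), rest.length ≤ n →
    ∀ (done : List Char) (c m : PySem.Set Char),
      pvA_loop (done ++ rest) done.length false c m = done ++ (pvB_loop rest).flatten := by
  intro n
  induction n with
  | zero =>
    intro rest hlen done c m
    have hnil : rest = [] := List.eq_nil_of_length_eq_zero (Nat.le_zero.mp hlen)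
    subst hnil
    rw [pvA_loop]; simp [pvB_loop]
  | succ n ih =>
    intro rest hlen done c m
    cases rest with
    | nil => rw [pvA_loop]; simp [pvB_loop]
    | cons x tl =>
      have hlt : done.length < (done ++ x :: tl).length := by simp
      have hget : (done ++ x :: tl)[done.length]'hlt = x := by simp
      by_cases hbr : x = '['
      · subst hbr
        rw [pvA_loop, dif_pos hlt, hget, if_pos ⟨rfl, rfl⟩]
        cases hidx : PySem.List.index? tl ']' with
        | none =>
          have hnotin : ']' ∉ tl := (PySem.List.index?_eq_none_iff _ _).mp hidx
          have hend := pvA_litEnd tl hnotin (done ++ ['[']) PySem.Set.empty PySem.Set.empty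
          rw [pvB_loop]
          simp only [if_pos rfl, hidx]
          simpa [List.append_assoc] using hend
        | some j =>
          obtain ⟨pre, suf, htl, hlenpre, hpre⟩ := (PySem.List.index?_eq_some_iff _ _ _).mp hidx
          subst htl
          subst hlenpre
          have hsuf : suf.length ≤ n := by simp at hlen; omega
          have hlit := pvA_litStep pre hpre suf (done ++ ['[']) PySem.Set.empty PySem.Set.empty
          have e1 : pvA_loop (done ++ '[' :: (pre ++ ']' :: suf)) (done.length + 1)
              true PySem.Set.empty PySem.Set.empty
              = pvA_loop ((done ++ ['[']) ++ (pre ++ ']' :: suf)) (done ++ ['[']).length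
                true PySem.Set.empty PySem.Set.empty := by
            simp [List.append_assoc]
          rw [e1, hlit,
            pvA_skipChar _ ']' suf _ _ (by decide) (by decide),
            ih suf hsuf]
          conv_rhs => rw [pvB_loop]
          simp only [if_pos rfl, hidx]
          have etake : (pre ++ ']' :: suf).take pre.length = pre := by simp
          have edrop : (pre ++ ']' :: suf).drop (pre.length + 1) = suf := by simp
          rw [etake, edrop, pvB_expand_eq pre]
          simp [List.append_assoc]
      · have htl : tl.length ≤ n := by simp at hlen; omega
        by_cases halpha : PySem.Chars.isalpha x = true
        · rw [pvA_loop, dif_pos hlt, hget, if_neg (by simp [hbr]), if_neg (by simp),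
            if_pos halpha]
          have etake : (done ++ x :: tl).take done.length = done := by simp
          have edrop : (done ++ x :: tl).drop (done.length + 1) = tl := by simp
          conv_rhs => rw [pvB_loop]
          by_cases hlow : PySem.Chars.islower x = true
          · simp only [if_pos hlow, if_neg hbr, if_pos halpha, etake, edrop]
            have := ih tl htl (done ++ ['[', x, PySem.Chars.upperChar x, ']']) c m
            simpa [List.append_assoc] using this
          · simp only [if_neg hlow, if_neg hbr, if_pos halpha, etake, edrop]
            have := ih tl htl (done ++ ['[', x, PySem.Chars.lowerChar x, ']']) c m
            simpa [List.append_assoc] using this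
        · rw [pvA_skipChar done x tl c m hbr (by simpa using halpha),
            ih tl htl]
          conv_rhs => rw [pvB_loop]
          simp only [if_neg hbr, if_neg halpha]
          simp [List.append_assoc]


lemma pv_main (l : List Char) :
    pvA_loop l 0 false PySem.Set.empty PySem.Set.empty = (pvB_loop l).flatten := by
  have h := pvA_normInv l.length l le_rfl [] PySem.Set.empty PySem.Set.empty
  simpa using h

-- ===== VERDICT (by name: the statement is the Claim_ definition above) =====
theorem translate_regex_spec : Claim_equal_translate_regex := by
  intro regex case_sensitive _ _
  unfold Spec_translate_regex translate_regex translate_regex_alt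
  cases case_sensitive
  · simp only [Bool.false_eq_true, Bool.true_eq_false, if_true, if_false]
    exact congrArg String.ofList (pv_main _)
  · simp only [Bool.true_eq_false, if_true, if_false]
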